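-- pv_equiv track=rewrite | github.com/MortadhaMannai/BERT-Neural-Language-Interface-Explainability-Explorer | evaluate_explanation.py | get_numbered_list
-- ===== SOURCE A (Python) =====
-- def get_numbered_list(token_list):
--     """
--     If there's a duplicate, append number to the second occurence.
--
--     [man, walks, man, man] -> [man, walks, man1, man2]
--     """
--     token_set = {}
--     new_token_list = []
--     for x in token_list:
--         if x in token_set:
--             new_token_list.append(x.lower() + str(token_set[x]))
--             token_set[x] += 1
--         else:
--             new_token_list.append(x.lower())
--             token_set[x] = 1
--     return new_token_list
-- ===== SOURCE B (Python) =====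
-- def get_numbered_list(token_list):
--     """
--     If there's a duplicate, append number to the second occurence.
--
--     [man, walks, man, man] -> [man, walks, man1, man2]
--     """
--     pairs = []
--     for x in reversed(token_list):
--         pairs = [(x, 0)] + [(y, r + 1) if y == x else (y, r) for y, r in pairs]
--     return [y.lower() if r == 0 else y.lower() + str(r) for y, r in pairs]
-- ===== Notes on version B (the rewrite author's own statement) =====
-- stated objective: alternative
-- what changed: Replaced A's left-to-right pass with a running occurrence dict by a right-to-left fold over (token, rank) pairs: each step prepends the new token with rank 0 and increments the rank of every equal token already collected, with a final rendering pass.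
import Mathlib
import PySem

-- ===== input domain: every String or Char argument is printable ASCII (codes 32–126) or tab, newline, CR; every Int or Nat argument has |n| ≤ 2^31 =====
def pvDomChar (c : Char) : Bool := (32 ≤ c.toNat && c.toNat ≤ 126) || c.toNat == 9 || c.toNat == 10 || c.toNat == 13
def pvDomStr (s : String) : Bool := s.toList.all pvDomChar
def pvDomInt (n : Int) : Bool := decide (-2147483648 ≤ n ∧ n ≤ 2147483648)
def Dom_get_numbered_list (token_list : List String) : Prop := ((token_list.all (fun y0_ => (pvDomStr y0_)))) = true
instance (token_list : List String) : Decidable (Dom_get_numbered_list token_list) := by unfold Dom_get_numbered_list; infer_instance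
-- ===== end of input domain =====

-- B replaces A's left-to-right pass with a running occurrence dict by a right-to-left
-- fold that keeps (token, rank) pairs: each step prepends the new token with rank 0 and
-- bumps the rank of every equal token already collected (alternative decomposition, no dict).

-- ===== PORT A =====
-- A's loop: running dict token_set and accumulator list, element by element.
def pvLoopA : List String → PySem.Dict String Int → List String → List String
  | [], _, acc => acc
  | x :: xs, d, acc =>
    match d.get? x with
    | some n => pvLoopA xs (d.insert x (n + 1)) (acc ++ [PySem.Str.lower x ++ PySem.Int.toStr n])
    | none   => pvLoopA xs (d.insert x 1) (acc ++ [PySem.Str.lower x])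

def get_numbered_list (token_list : List String) : List String :=
  pvLoopA token_list PySem.Dict.empty []

-- ===== PORT B =====
def get_numbered_list_alt (token_list : List String) : List String :=
  let pairs := token_list.reverse.foldl
    (fun pairs x =>
      (x, (0 : Int)) :: pairs.map (fun q => if q.1 == x then (q.1, q.2 + 1) else q)) []
  pairs.map (fun q =>
    if q.2 == 0 then PySem.Str.lower q.1 else PySem.Str.lower q.1 ++ PySem.Int.toStr q.2)

-- ===== PRECONDITION & SPEC =====
def Spec_get_numbered_list (token_list : List String) (out : List String) : Prop := out = get_numbered_list_alt token_list
instance (token_list : List String) (out : List String) : Decidable (Spec_get_numbered_list token_list out) := by unfold Spec_get_numbered_list; infer_instance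

-- ===== CLAIM (what is proved, stated in full; the proofs are below) =====
def Claim_equal_get_numbered_list : Prop := ∀ (token_list : List String), Dom_get_numbered_list token_list → Spec_get_numbered_list token_list (get_numbered_list token_list)

-- ===== LEMMAS AND PROOFS =====

-- common specification: the (token, rank) pairs of xs after the already-seen prefix p
def pvZip : List String → List String → List (String × Int)
  | _, [] => []
  | p, x :: xs => (x, (p.count x : Int)) :: pvZip (p ++ [x]) xs

-- rendering the pairs gives A's strings
def pvSpec (p xs : List String) : List String :=
  (pvZip p xs).map (fun q =>
    if q.2 == 0 then PySem.Str.lower q.1 else PySem.Str.lower q.1 ++ PySem.Int.toStr q.2)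

lemma pvLoopA_eq (xs : List String) : ∀ (p : List String) (d : PySem.Dict String Int)
    (_ : ∀ y, d.get? y = if p.count y = 0 then none else some ((p.count y : Nat) : Int))
    (acc : List String), pvLoopA xs d acc = acc ++ pvSpec p xs := by
  induction xs with
  | nil => intro p d hd acc; simp [pvLoopA, pvSpec, pvZip]
  | cons x xs ih =>
    intro p d hd acc
    have hinv : ∀ (v : Int), v = (p.count x : Int) + 1 →
        ∀ y, (d.insert x v).get? y =
          if (p ++ [x]).count y = 0 then none else some (((p ++ [x]).count y : Nat) : Int) := by
      intro v hv y
      rw [PySem.Dict.get?_insert]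
      by_cases hyx : y = x
      · subst hyx
        simp [List.count_append, hv]
      · simp [List.count_append, hyx, hd y, Ne.symm hyx]
    by_cases h : p.count x = 0
    · have hg : d.get? x = none := by rw [hd x]; simp [h]
      simp only [pvLoopA, hg, pvSpec, pvZip, List.map_cons, h]
      rw [ih (p ++ [x]) _ (hinv 1 (by simp [h])) _]
      simp [pvSpec]
    · have hg : d.get? x = some ((p.count x : Nat) : Int) := by rw [hd x]; simp [h]
      simp only [pvLoopA, hg, pvSpec, pvZip, List.map_cons]
      rw [ih (p ++ [x]) _ (hinv _ rfl) _]
      have hne : (((p.count x : Nat) : Int) == 0) = false := by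
        simp
        omega
      simp [hne, pvSpec]

-- bumping the ranks of x-entries turns counts over p into counts over x :: p
lemma pvBump_eq (xs : List String) : ∀ (p : List String) (x : String),
    (pvZip p xs).map (fun q => if q.1 == x then (q.1, q.2 + 1) else q)
      = pvZip (x :: p) xs := by
  induction xs with
  | nil => intro p x; simp [pvZip]
  | cons y ys ih =>
    intro p x
    simp only [pvZip, List.map_cons]
    rw [ih (p ++ [y]) x]
    congr 1
    by_cases h : y = x
    · subst h; simp
    · simp [h, Ne.symm h]

-- B's fold builds exactly the pvZip pairs
lemma pvFoldB_eq (xs : List String) :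
    xs.reverse.foldl
      (fun pairs x =>
        (x, (0 : Int)) :: pairs.map (fun q => if q.1 == x then (q.1, q.2 + 1) else q)) []
      = pvZip [] xs := by
  rw [List.foldl_reverse]
  induction xs with
  | nil => simp [pvZip]
  | cons x ys ih =>
    simp only [List.foldr_cons, ih, pvZip, List.count_nil]
    rw [pvBump_eq ys [] x]
    simp

-- ===== VERDICT (by name: the statement is the Claim_ definition above) =====
theorem get_numbered_list_spec : Claim_equal_get_numbered_list := by
  intro tl _
  unfold Spec_get_numbered_list get_numbered_list get_numbered_list_alt
  rw [pvLoopA_eq tl [] PySem.Dict.empty (by intro y; simp [PySem.Dict.get?_empty]) []]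
  rw [pvFoldB_eq tl]
  simp [pvSpec]
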